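-- pv_equiv track=rewrite | github.com/karilaa-dev/vibecraft | mcp-server/src/vibecraft/furniture_placer.py | _rotate_shape_property
-- ===== SOURCE A (Python) =====
-- def _rotate_shape_property(shape: str, rotation: int) -> str:
--     """Rotate directional shape values (rails, corners, etc.)."""
--     if rotation % 360 == 0:
--         return shape
--
--     steps = (rotation // 90) % 4
--     if steps == 0:
--         return shape
--
--     rot90 = {
--         'north_south': 'east_west',
--         'east_west': 'north_south',
--         'ascending_north': 'ascending_east',
--         'ascending_east': 'ascending_south',
--         'ascending_south': 'ascending_west',
--         'ascending_west': 'ascending_north',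
--         'north_east': 'south_east',
--         'south_east': 'south_west',
--         'south_west': 'north_west',
--         'north_west': 'north_east',
--     }
--
--     rotated = shape
--     for _ in range(steps):
--         rotated = rot90.get(rotated, rotated)
--     return rotated
-- ===== SOURCE B (Python) =====
-- def _rotate_shape_property(shape: str, rotation: int) -> str:
--     """Rotate directional shape values via closed-form cycle indexing."""
--     if rotation % 360 == 0:
--         return shape
--     steps = (rotation // 90) % 4
--     if steps == 0:
--         return shape
--     cycles = (
--         ['north_south', 'east_west'],
--         ['ascending_north', 'ascending_east', 'ascending_south', 'ascending_west'],
--         ['north_east', 'south_east', 'south_west', 'north_west'],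
--     )
--     for cyc in cycles:
--         if shape in cyc:
--             i = cyc.index(shape)
--             return cyc[(i + steps) % len(cyc)]
--     return shape
-- ===== Notes on version B (the rewrite author's own statement) =====
-- stated objective: simpler
-- what changed: Replaces the repeated application of a 10-entry single-step rotation dict (steps iterations) with a single closed-form modular index lookup in three explicit rotation cycle lists.
import Mathlib
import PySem

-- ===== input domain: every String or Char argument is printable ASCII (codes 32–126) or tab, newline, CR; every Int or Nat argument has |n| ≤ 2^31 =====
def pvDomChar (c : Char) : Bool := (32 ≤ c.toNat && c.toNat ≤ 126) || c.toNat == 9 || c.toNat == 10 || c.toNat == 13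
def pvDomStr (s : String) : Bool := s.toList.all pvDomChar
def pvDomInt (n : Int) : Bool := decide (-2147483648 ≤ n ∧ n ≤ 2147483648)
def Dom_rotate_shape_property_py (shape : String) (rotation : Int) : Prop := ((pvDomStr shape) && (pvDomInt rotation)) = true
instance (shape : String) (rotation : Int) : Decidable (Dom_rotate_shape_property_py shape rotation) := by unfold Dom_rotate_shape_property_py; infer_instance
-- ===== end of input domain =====

-- B replaces A's repeated single-step map application by a closed-form modular
-- index lookup in three explicit rotation cycles (objective: simpler).

-- ===== PORT A =====
-- the rot90 dict of A, literal
def pvRot90 : PySem.Dict String String := PySem.Dict.ofList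
  [("north_south", "east_west"),
   ("east_west", "north_south"),
   ("ascending_north", "ascending_east"),
   ("ascending_east", "ascending_south"),
   ("ascending_south", "ascending_west"),
   ("ascending_west", "ascending_north"),
   ("north_east", "south_east"),
   ("south_east", "south_west"),
   ("south_west", "north_west"),
   ("north_west", "north_east")]

def rotate_shape_property_py (shape : String) (rotation : Int) : String :=
  if PySem.Int.mod rotation 360 = 0 then shape
  else
    let steps := PySem.Int.mod (PySem.Int.floordiv rotation 90) 4
    if steps = 0 then shape
    else
      (PySem.List.pyRange 0 steps 1).foldl
        (fun rotated _ => pvRot90.getD rotated rotated) shape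

-- ===== PORT B =====
def pvCycles : List (List String) :=
  [["north_south", "east_west"],
   ["ascending_north", "ascending_east", "ascending_south", "ascending_west"],
   ["north_east", "south_east", "south_west", "north_west"]]

-- the `for cyc in cycles` loop of Source B
def pvFindCycle (shape : String) (steps : Int) : List (List String) → String
  | [] => shape
  | cyc :: rest =>
    if shape ∈ cyc then
      -- shape ∈ cyc, so .index succeeds; the modular index is provably in range,
      -- so the .getD default is never used
      let i : Int := ((PySem.List.index? cyc shape).getD 0 : Nat)
      (PySem.List.pyGet? cyc (PySem.Int.mod (i + steps) (cyc.length : Int))).getD shape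
    else pvFindCycle shape steps rest

def rotate_shape_property_py_alt (shape : String) (rotation : Int) : String :=
  if PySem.Int.mod rotation 360 = 0 then shape
  else
    let steps := PySem.Int.mod (PySem.Int.floordiv rotation 90) 4
    if steps = 0 then shape
    else pvFindCycle shape steps pvCycles

-- ===== PRECONDITION & SPEC =====
def Spec_rotate_shape_property_py (shape : String) (rotation : Int) (out : String) : Prop := out = rotate_shape_property_py_alt shape rotation
instance (shape : String) (rotation : Int) (out : String) : Decidable (Spec_rotate_shape_property_py shape rotation out) := by unfold Spec_rotate_shape_property_py; infer_instance

-- ===== CLAIM (what is proved, stated in full; the proofs are below) =====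
def Claim_equal_rotate_shape_property_py : Prop := ∀ (shape : String) (rotation : Int), Dom_rotate_shape_property_py shape rotation → Spec_rotate_shape_property_py shape rotation (rotate_shape_property_py shape rotation)

-- ===== LEMMAS AND PROOFS =====

-- core lemma: for each concrete steps ∈ {1,2,3}, the iterated map equals the cycle lookup
theorem pvAgree (shape : String) (steps : Int)
    (hs : steps = 1 ∨ steps = 2 ∨ steps = 3) :
    (PySem.List.pyRange 0 steps 1).foldl
      (fun rotated _ => pvRot90.getD rotated rotated) shape
    = pvFindCycle shape steps pvCycles := by
  by_cases h1 : shape = "north_south"; · subst h1; rcases hs with h|h|h <;> subst h <;> decide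
  by_cases h2 : shape = "east_west"; · subst h2; rcases hs with h|h|h <;> subst h <;> decide
  by_cases h3 : shape = "ascending_north"; · subst h3; rcases hs with h|h|h <;> subst h <;> decide
  by_cases h4 : shape = "ascending_east"; · subst h4; rcases hs with h|h|h <;> subst h <;> decide
  by_cases h5 : shape = "ascending_south"; · subst h5; rcases hs with h|h|h <;> subst h <;> decide
  by_cases h6 : shape = "ascending_west"; · subst h6; rcases hs with h|h|h <;> subst h <;> decide
  by_cases h7 : shape = "north_east"; · subst h7; rcases hs with h|h|h <;> subst h <;> decide
  by_cases h8 : shape = "south_east"; · subst h8; rcases hs with h|h|h <;> subst h <;> decide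
  by_cases h9 : shape = "south_west"; · subst h9; rcases hs with h|h|h <;> subst h <;> decide
  by_cases h10 : shape = "north_west"; · subst h10; rcases hs with h|h|h <;> subst h <;> decide
  -- shape is none of the ten keys: both sides are fixed at shape
  have hfix : pvRot90.getD shape shape = shape := by
    have hk : pvRot90 = PySem.Dict.mk
        [("north_south", "east_west"), ("east_west", "north_south"),
         ("ascending_north", "ascending_east"), ("ascending_east", "ascending_south"),
         ("ascending_south", "ascending_west"), ("ascending_west", "ascending_north"),
         ("north_east", "south_east"), ("south_east", "south_west"),
         ("south_west", "north_west"), ("north_west", "north_east")] := by decide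
    simp [hk, PySem.Dict.getD, PySem.Dict.get?_mk_cons, PySem.Dict.get?,
          Ne.symm h1, Ne.symm h2, Ne.symm h3, Ne.symm h4, Ne.symm h5,
          Ne.symm h6, Ne.symm h7, Ne.symm h8, Ne.symm h9, Ne.symm h10]
  have hA : ∀ l : List Int,
      List.foldl (fun rotated _ => pvRot90.getD rotated rotated) shape l = shape := by
    intro l
    induction l with
    | nil => rfl
    | cons a t ih => simpa [List.foldl, hfix] using ih
  have hB : pvFindCycle shape steps pvCycles = shape := by
    simp [pvFindCycle, pvCycles, h1, h2, h3, h4, h5, h6, h7, h8, h9, h10]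
  rw [hA, hB]

-- ===== VERDICT (by name: the statement is the Claim_ definition above) =====
theorem rotate_shape_property_py_spec : Claim_equal_rotate_shape_property_py := by
  intro shape rotation _
  unfold Spec_rotate_shape_property_py rotate_shape_property_py rotate_shape_property_py_alt
  by_cases h360 : PySem.Int.mod rotation 360 = 0
  · rw [if_pos h360, if_pos h360]
  · rw [if_neg h360, if_neg h360]
    dsimp only
    set s := PySem.Int.mod (PySem.Int.floordiv rotation 90) 4 with hsdef
    have h0 : 0 ≤ s := PySem.Int.mod_nonneg _ (by norm_num)
    have h4 : s < 4 := PySem.Int.mod_lt _ (by norm_num)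
    by_cases hz : s = 0
    · rw [if_pos hz, if_pos hz]
    · rw [if_neg hz, if_neg hz]
      exact pvAgree shape s (by omega)
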